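-- pv_equiv track=rewrite | github.com/zzssyy/CircPePred | data_processing.py | get_fea_name_dict
-- ===== SOURCE A (Python) =====
-- def get_fea_name_dict(f_name, Eachfeature):
--     value = 0
--     key = ''
--     f_nef = {}
--     for i,j in zip(f_name, Eachfeature):
--         h = value
--         key = i
--         value += len(j)
--         values = (h, value)
--         f_nef[key] = values
--     return f_nef
-- ===== SOURCE B (Python) =====
-- def get_fea_name_dict(f_name, Eachfeature):
--     pairs = list(zip(f_name, Eachfeature))
--     return {name: (sum(len(q) for _, q in pairs[:k]),
--                    sum(len(q) for _, q in pairs[:k + 1]))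
--             for k, (name, _) in enumerate(pairs)}
-- ===== Notes on version B (the rewrite author's own statement) =====
-- stated objective: alternative
-- what changed: B keeps no running state: it is a dict comprehension where each name's (start, end) pair is computed independently as closed-form slice sums sum(len(q) for _, q in pairs[:k]) / pairs[:k+1], instead of A's single pass with a running accumulator mutating the dict.
import Mathlib
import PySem

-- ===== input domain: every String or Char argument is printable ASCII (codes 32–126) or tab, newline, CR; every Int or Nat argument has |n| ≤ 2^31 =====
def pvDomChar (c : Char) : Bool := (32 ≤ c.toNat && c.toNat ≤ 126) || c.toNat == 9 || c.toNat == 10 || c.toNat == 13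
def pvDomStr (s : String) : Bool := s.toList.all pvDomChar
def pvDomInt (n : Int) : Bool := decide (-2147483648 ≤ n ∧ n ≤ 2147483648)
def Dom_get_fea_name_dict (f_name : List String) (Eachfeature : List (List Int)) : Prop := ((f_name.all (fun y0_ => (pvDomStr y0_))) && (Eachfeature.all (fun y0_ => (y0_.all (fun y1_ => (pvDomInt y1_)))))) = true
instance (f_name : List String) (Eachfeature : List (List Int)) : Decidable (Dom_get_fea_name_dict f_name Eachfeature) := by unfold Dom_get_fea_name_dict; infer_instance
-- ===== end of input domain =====

-- B replaces A's running accumulator by a stateless dict comprehension: each name's (start, end) is an independent closed-form slice sum (alternative; O(n^2), not claimed faster).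


-- ===== PORT A =====
-- value=0; f_nef is a PySem.Dict built by insertion inside the loop; the return is its items list
def get_fea_name_dict (f_name : List String) (Eachfeature : List (List Int)) : List (String × Int × Int) :=
  ((f_name.zip Eachfeature).foldl
    (fun (st : Int × PySem.Dict String (Int × Int)) ij =>
      let h := st.1
      let value := st.1 + (ij.2.length : Int)
      (value, st.2.insert ij.1 (h, value)))
    (0, PySem.Dict.empty)).2.items

-- ===== PORT B =====
-- sum(len(q) for _, q in l) of Source B's generator expression
def pvLenSum (l : List (String × List Int)) : Int :=
  (l.map (fun p => (p.2.length : Int))).sum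

-- the dict comprehension: Dict.ofList of the per-index entries; pairs[:k] is PySem.List.slice
def get_fea_name_dict_alt (f_name : List String) (Eachfeature : List (List Int)) : List (String × Int × Int) :=
  let pairs := f_name.zip Eachfeature
  (PySem.Dict.ofList ((PySem.List.enumerate pairs 0).map
    (fun kp => (kp.2.1,
      (pvLenSum (PySem.List.slice pairs none (some kp.1)),
       pvLenSum (PySem.List.slice pairs none (some (kp.1 + 1)))))))).items

-- ===== PRECONDITION & SPEC =====
def Spec_get_fea_name_dict (f_name : List String) (Eachfeature : List (List Int)) (out : List (String × Int × Int)) : Prop := out = get_fea_name_dict_alt f_name Eachfeature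
instance (f_name : List String) (Eachfeature : List (List Int)) (out : List (String × Int × Int)) : Decidable (Spec_get_fea_name_dict f_name Eachfeature out) := by unfold Spec_get_fea_name_dict; infer_instance

-- ===== CLAIM (what is proved, stated in full; the proofs are below) =====
def Claim_equal_get_fea_name_dict : Prop := ∀ (f_name : List String) (Eachfeature : List (List Int)), Dom_get_fea_name_dict f_name Eachfeature → Spec_get_fea_name_dict f_name Eachfeature (get_fea_name_dict f_name Eachfeature)

-- ===== LEMMAS AND PROOFS =====

-- the per-entry list B maps over, written structurally with an explicit offset
def pvEntries : List (String × List Int) → Int → List (String × Int × Int)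
  | [], _ => []
  | p :: rest, v => (p.1, (v, v + (p.2.length : Int))) :: pvEntries rest (v + (p.2.length : Int))

-- B's enumerate/slice entry list, indexed from s = prefix length over full = prefix ++ pairs, IS pvEntries with offset pvLenSum prefix
lemma entries_enum (pairs : List (String × List Int)) :
    ∀ (pre : List (String × List Int)),
    (PySem.List.enumerate pairs (pre.length : Int)).map
      (fun kp => (kp.2.1,
        (pvLenSum (PySem.List.slice (pre ++ pairs) none (some kp.1)),
         pvLenSum (PySem.List.slice (pre ++ pairs) none (some (kp.1 + 1)))))) =
    pvEntries pairs (pvLenSum pre) := by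
  induction pairs with
  | nil => intro pre; simp [PySem.List.enumerate_nil, pvEntries]
  | cons p rest ih =>
      intro pre
      have h1 : PySem.List.slice (pre ++ p :: rest) none (some (pre.length : Int)) = pre := by
        rw [PySem.List.slice_to_natCast]; exact List.take_left
      have h2 : PySem.List.slice (pre ++ p :: rest) none (some ((pre.length : Int) + 1)) = pre ++ [p] := by
        have he : ((pre.length : Int) + 1) = (((pre ++ [p]).length : Nat) : Int) := by simp
        rw [he, show pre ++ p :: rest = (pre ++ [p]) ++ rest by simp, PySem.List.slice_to_natCast]
        exact List.take_left
      have hsum : pvLenSum (pre ++ [p]) = pvLenSum pre + (p.2.length : Int) := by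
        simp [pvLenSum]
      have ih' := ih (pre ++ [p])
      rw [hsum] at ih'
      simp only [PySem.List.enumerate_cons, List.map_cons, pvEntries, h1, h2, hsum]
      have hlen : ((pre.length : Int) + 1) = (((pre ++ [p]).length : Nat) : Int) := by simp
      rw [hlen, show pre ++ p :: rest = (pre ++ [p]) ++ rest by simp, ih']

-- the common loop shape: inserting pvEntries into d is exactly A's accumulator loop
lemma fold_entries (pairs : List (String × List Int)) :
    ∀ (v : Int) (d : PySem.Dict String (Int × Int)),
    (pvEntries pairs v).foldl (fun d q => d.insert q.1 q.2) d =
    (pairs.foldl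
      (fun (st : Int × PySem.Dict String (Int × Int)) ij =>
        let h := st.1
        let value := st.1 + (ij.2.length : Int)
        (value, st.2.insert ij.1 (h, value)))
      (v, d)).2 := by
  induction pairs with
  | nil => intro v d; simp [pvEntries]
  | cons p rest ih => intro v d; simpa [pvEntries] using ih (v + (p.2.length : Int)) _

-- the two ports build the same dict
lemma dict_eq (pairs : List (String × List Int)) :
    PySem.Dict.ofList ((PySem.List.enumerate pairs 0).map
      (fun kp => (kp.2.1,
        (pvLenSum (PySem.List.slice pairs none (some kp.1)),
         pvLenSum (PySem.List.slice pairs none (some (kp.1 + 1))))))) =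
    (pairs.foldl
      (fun (st : Int × PySem.Dict String (Int × Int)) ij =>
        let h := st.1
        let value := st.1 + (ij.2.length : Int)
        (value, st.2.insert ij.1 (h, value)))
      (0, PySem.Dict.empty)).2 := by
  have h := entries_enum pairs []
  simp only [List.length_nil, Int.natCast_zero, List.nil_append] at h
  calc PySem.Dict.ofList ((PySem.List.enumerate pairs 0).map
        (fun kp => (kp.2.1,
          (pvLenSum (PySem.List.slice pairs none (some kp.1)),
           pvLenSum (PySem.List.slice pairs none (some (kp.1 + 1)))))))
      = PySem.Dict.ofList (pvEntries pairs (pvLenSum [])) := by rw [h]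
    _ = (pvEntries pairs 0).foldl (fun d q => d.insert q.1 q.2) PySem.Dict.empty := rfl
    _ = _ := fold_entries pairs 0 _

-- ===== VERDICT (by name: the statement is the Claim_ definition above) =====
theorem get_fea_name_dict_spec : Claim_equal_get_fea_name_dict := by
  unfold Claim_equal_get_fea_name_dict
  intro f_name Eachfeature _
  unfold Spec_get_fea_name_dict get_fea_name_dict get_fea_name_dict_alt
  exact (congrArg PySem.Dict.items (dict_eq (f_name.zip Eachfeature))).symm
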